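-- pv_equiv track=rewrite | github.com/moshekagan/personal_teaching | Zohar_Ben_Gurion_University/recursion/towers.py | n_tower
-- ===== SOURCE A (Python) =====
-- def distance(row1, col1, row2, col2):
--     rows = row1 - row2 if row1 > row2 else row2 - row1
--     cols = col1 - col2 if col1 > col2 else col2 - col1
--     return rows + cols
--
-- def add_tower(board, d, row, col):
--     for i in range(row):
--         if distance(i, board[i], row, col) <= d:
--             return False
--
--     board[row] = col
--     return True
--
-- def n_tower_helper(board, d, row):
--     if row == len(board):
--         return True
--
--     for i in range(len(board)):
--         if add_tower(board, d, row, i):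
--             return n_tower_helper(board, d, row+1)
--
--     return False
--
-- def n_tower(n, d):
--     for i in range(n):
--         board = [0] * n
--         board[0] = i
--         res = n_tower_helper(board, d, 1)
--         if res:
--             return board
--
--     return []
-- ===== SOURCE B (Python) =====
-- def n_tower(n, d):
--     for start in range(n):
--         cols = [start]
--         ok = True
--         for row in range(1, n):
--             ivs = sorted(((c - (d - (row - j)), c + (d - (row - j)))
--                           for j, c in enumerate(cols) if d - (row - j) >= 0),
--                          key=lambda iv: iv[0])
--             free = 0
--             for lo, hi in ivs:
--                 if lo <= free:
--                     free = max(free, hi + 1)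
--             if free < n:
--                 cols.append(free)
--             else:
--                 ok = False
--                 break
--         if ok:
--             return cols
--     return []
-- ===== Notes on version B (the rewrite author's own statement) =====
-- stated objective: faster
-- what changed: Per row, instead of testing every candidate column against all previously placed towers, B turns each nearby tower into a forbidden column interval, sorts the intervals and sweeps them once to find the first free column directly.
import Mathlib
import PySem

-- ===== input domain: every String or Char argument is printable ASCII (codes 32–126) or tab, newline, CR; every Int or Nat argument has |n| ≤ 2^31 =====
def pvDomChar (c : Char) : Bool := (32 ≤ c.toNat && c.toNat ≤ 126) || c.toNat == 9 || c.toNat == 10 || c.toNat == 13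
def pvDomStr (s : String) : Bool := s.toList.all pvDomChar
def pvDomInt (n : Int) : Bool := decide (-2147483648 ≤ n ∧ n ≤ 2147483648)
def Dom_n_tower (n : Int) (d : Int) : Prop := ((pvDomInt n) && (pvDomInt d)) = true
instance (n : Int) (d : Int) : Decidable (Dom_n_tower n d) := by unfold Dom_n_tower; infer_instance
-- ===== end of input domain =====

-- B replaces A's per-row scan of every candidate column against all placed towers by
-- sorted forbidden-column intervals swept once for the first free column (objective: faster).

-- ===== PORT A =====
def distancePy (row1 col1 row2 col2 : Int) : Int :=
  (if row1 > row2 then row1 - row2 else row2 - row1) +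
  (if col1 > col2 then col1 - col2 else col2 - col1)

-- add_tower: returns none for False, some (updated board) for True.
-- board[i] / board[row]=col are always in range in A's calls, so the total forms are exact.
def add_tower (board : List Int) (d row col : Int) : Option (List Int) :=
  if (PySem.List.pyRange 0 row 1).any
      (fun i => distancePy i (PySem.List.pyGetD board i 0) row col ≤ d)
  then none
  else some (PySem.List.pySetD board row col)

-- n_tower_helper mutates board; the port returns (result, board).  The fuel argument equals
-- the number of rows still to fill ((len board - row).toNat) in every reachable call, so the
-- fuel-0 fallback is never taken where A returns.
def n_tower_helperGo : Nat → List Int → Int → Int → Bool × List Int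
  | 0, board, _, row =>
    if row = (board.length : Int) then (true, board) else (false, board)
  | fuel + 1, board, d, row =>
    if row = (board.length : Int) then (true, board)
    else
      match (PySem.List.pyRange 0 (board.length : Int) 1).findSome?
              (fun i => add_tower board d row i) with
      | some board' => n_tower_helperGo fuel board' d (row + 1)
      | none => (false, board)

def n_tower_helper (board : List Int) (d row : Int) : Bool × List Int :=
  n_tower_helperGo ((board.length : Int) - row).toNat board d row

def n_tower (n : Int) (d : Int) : List Int :=
  ((PySem.List.pyRange 0 n 1).findSome? (fun i =>
      let board := PySem.List.pySetD (List.replicate n.toNat 0) 0 i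
      let r := n_tower_helper board d 1
      if r.1 then some r.2 else none)).getD []

-- ===== PORT B =====
def sweepFree (ivs : List (Int × Int)) : Int :=
  ivs.foldl (fun free iv => if iv.1 ≤ free then max free (iv.2 + 1) else free) 0

def rowIntervals (cols : List Int) (d row : Int) : List (Int × Int) :=
  PySem.List.sorted
    ((PySem.List.enumerate cols 0).filterMap (fun jc =>
      if 0 ≤ d - (row - jc.1) then
        some (jc.2 - (d - (row - jc.1)), jc.2 + (d - (row - jc.1)))
      else none))
    (fun iv => iv.1) false

def n_tower_alt (n : Int) (d : Int) : List Int :=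
  ((PySem.List.pyRange 0 n 1).findSome? (fun start =>
      (PySem.List.pyRange 1 n 1).foldl (fun acc row =>
          acc.bind (fun cols =>
            let free := sweepFree (rowIntervals cols d row)
            if free < n then some (cols ++ [free]) else none))
        (some [start]))).getD []


-- ===== PRECONDITION & SPEC =====
def Spec_n_tower (n : Int) (d : Int) (out : List Int) : Prop := out = n_tower_alt n d
instance (n : Int) (d : Int) (out : List Int) : Decidable (Spec_n_tower n d out) := by unfold Spec_n_tower; infer_instance

-- ===== CLAIM (what is proved, stated in full; the proofs are below) =====
def Claim_equal_n_tower : Prop := ∀ (n : Int) (d : Int), Dom_n_tower n d → Spec_n_tower n d (n_tower n d)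

-- ===== LEMMAS AND PROOFS =====

def coveredA (cols : List Int) (d row c : Int) : Prop :=
  ∃ k : Nat, k < cols.length ∧ distancePy (k : Int) (cols.getD k 0) row c ≤ d

def coveredBy (ivs : List (Int × Int)) (c : Int) : Prop :=
  ∃ iv ∈ ivs, iv.1 ≤ c ∧ c ≤ iv.2


lemma findSome?_pyRange_first {β : Type} (g : Int → Option β) (b m : Int) :
    ∀ (k : Nat) (a : Int), (b - a).toNat = k → a ≤ m →
      (∀ c, a ≤ c → c < m → g c = none) → (m < b → (g m).isSome) →
      (PySem.List.pyRange a b 1).findSome? g = if m < b then g m else none := by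
  intro k
  induction k with
  | zero =>
    intro a hk ham hcov hfair
    rw [PySem.List.pyRange_one_eq_nil (by omega), if_neg (by omega)]
    rfl
  | succ k ih =>
    intro a hk ham hcov hfair
    have hab : a < b := by omega
    rw [PySem.List.pyRange_one_cons hab, List.findSome?_cons]
    rcases lt_or_eq_of_le ham with h | h
    · rw [hcov a le_rfl h]
      exact ih (a+1) (by omega) (by omega) (fun c hc1 hc2 => hcov c (by omega) hc2) hfair
    · subst h
      have hs := hfair hab
      cases hg : g a with
      | none => rw [hg] at hs; simp at hs
      | some v => simp [if_pos hab]

lemma coveredBy_cons {iv : Int × Int} {t : List (Int × Int)} {c : Int} :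
    coveredBy (iv :: t) c ↔ (iv.1 ≤ c ∧ c ≤ iv.2) ∨ coveredBy t c := by
  simp [coveredBy]

lemma sweep_const (ivs : List (Int × Int)) : ∀ (start : Int),
    (∀ iv ∈ ivs, start < iv.1) →
    ivs.foldl (fun free iv => if iv.1 ≤ free then max free (iv.2 + 1) else free) start = start := by
  induction ivs with
  | nil => intro start _; rfl
  | cons iv t ih =>
    intro start h
    rw [List.foldl_cons, if_neg (by have := h iv (by simp); omega)]
    exact ih start (fun x hx => h x (by simp [hx]))

lemma sweep_spec (ivs : List (Int × Int)) : ∀ (start : Int),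
    ivs.Pairwise (fun a b => a.1 ≤ b.1) →
    start ≤ ivs.foldl (fun free iv => if iv.1 ≤ free then max free (iv.2 + 1) else free) start ∧
    (∀ c, start ≤ c → c < ivs.foldl (fun free iv => if iv.1 ≤ free then max free (iv.2 + 1) else free) start → coveredBy ivs c) ∧
    ¬ coveredBy ivs (ivs.foldl (fun free iv => if iv.1 ≤ free then max free (iv.2 + 1) else free) start) := by
  induction ivs with
  | nil =>
    intro start _
    simp only [List.foldl_nil]
    exact ⟨le_rfl, fun c h1 h2 => absurd h2 (by omega), by simp [coveredBy]⟩
  | cons iv t ih =>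
    intro start hs
    rw [List.pairwise_cons] at hs
    obtain ⟨hhd, htl⟩ := hs
    by_cases hlo : iv.1 ≤ start
    · rw [List.foldl_cons, if_pos hlo]
      obtain ⟨h1, h2, h3⟩ := ih (max start (iv.2 + 1)) htl
      refine ⟨by omega, ?_, ?_⟩
      · intro c hc1 hc2
        rw [coveredBy_cons]
        by_cases hcm : c < max start (iv.2 + 1)
        · exact Or.inl ⟨by omega, by omega⟩
        · exact Or.inr (h2 c (by omega) hc2)
      · rw [coveredBy_cons]
        rintro (⟨ha, hb⟩ | hcb)
        · omega
        · exact h3 hcb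
    · have hall : ∀ x ∈ iv :: t, start < x.1 := by
        intro x hx
        rcases List.mem_cons.mp hx with rfl | hx
        · omega
        · have := hhd x hx; omega
      rw [sweep_const _ _ hall]
      refine ⟨le_rfl, fun c h1 h2 => absurd h2 (by omega), ?_⟩
      rintro ⟨x, hx, hx1, _⟩
      have := hall x hx; omega

lemma mem_rowIntervals (cols : List Int) (d row : Int) (iv : Int × Int) :
    iv ∈ rowIntervals cols d row ↔
      ∃ k : Nat, k < cols.length ∧ 0 ≤ d - (row - k) ∧
        iv = (cols.getD k 0 - (d - (row - k)), cols.getD k 0 + (d - (row - k))) := by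
  unfold rowIntervals
  rw [PySem.List.mem_sorted, List.mem_filterMap]
  constructor
  · rintro ⟨a, ha, hfa⟩
    rw [PySem.List.mem_enumerate_iff] at ha
    obtain ⟨k, hk, rfl⟩ := ha
    simp only [zero_add] at hfa ⊢
    split_ifs at hfa with hcond
    · refine ⟨k, hk, hcond, ?_⟩
      rw [List.getD_eq_getElem _ _ hk]
      exact (Option.some_inj.mp hfa).symm
  · rintro ⟨k, hk, hcond, rfl⟩
    refine ⟨((k : Int), cols[k]), ?_, ?_⟩
    · rw [PySem.List.mem_enumerate_iff]
      exact ⟨k, hk, by simp⟩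
    · simp only
      rw [if_pos hcond, List.getD_eq_getElem _ _ hk]

lemma coveredBy_rowIntervals (cols : List Int) (d c : Int) :
    coveredBy (rowIntervals cols d (cols.length : Int)) c ↔
      coveredA cols d (cols.length : Int) c := by
  unfold coveredBy coveredA
  constructor
  · rintro ⟨iv, hiv, h1, h2⟩
    rw [mem_rowIntervals] at hiv
    obtain ⟨k, hk, hcond, rfl⟩ := hiv
    refine ⟨k, hk, ?_⟩
    unfold distancePy
    rw [if_neg (by exact_mod_cast not_lt.mpr (le_of_lt hk))]
    simp only at h1 h2
    split_ifs <;> omega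
  · rintro ⟨k, hk, hd⟩
    unfold distancePy at hd
    rw [if_neg (by exact_mod_cast not_lt.mpr (le_of_lt hk))] at hd
    refine ⟨(cols.getD k 0 - (d - ((cols.length : Int) - k)), cols.getD k 0 + (d - ((cols.length : Int) - k))), ?_, ?_, ?_⟩
    · rw [mem_rowIntervals]
      exact ⟨k, hk, by split_ifs at hd <;> omega, rfl⟩
    · simp only
      split_ifs at hd <;> omega
    · simp only
      split_ifs at hd <;> omega
lemma add_tower_cond (cols rest : List Int) (d c : Int) :
    ((PySem.List.pyRange 0 (cols.length : Int) 1).any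
      (fun i => distancePy i (PySem.List.pyGetD (cols ++ rest) i 0) (cols.length : Int) c ≤ d)) = true
    ↔ coveredA cols d (cols.length : Int) c := by
  rw [List.any_eq_true]
  unfold coveredA
  constructor
  · rintro ⟨x, hx, hpx⟩
    rw [PySem.List.mem_pyRange_one] at hx
    refine ⟨x.toNat, by omega, ?_⟩
    have hxx : x = (x.toNat : Int) := by omega
    rw [hxx, PySem.List.pyGetD_natCast, List.getD_append _ _ _ _ (by omega)] at hpx
    rw [← hxx] at hpx ⊢
    exact of_decide_eq_true hpx
  · rintro ⟨k, hk, hpk⟩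
    refine ⟨(k : Int), ?_, ?_⟩
    · rw [PySem.List.mem_pyRange_one]; omega
    · rw [PySem.List.pyGetD_natCast, List.getD_append _ _ _ _ (by omega)]
      exact decide_eq_true hpk

lemma add_tower_none (cols rest : List Int) (d c : Int)
    (h : coveredA cols d (cols.length : Int) c) :
    add_tower (cols ++ rest) d (cols.length : Int) c = none := by
  unfold add_tower
  rw [if_pos ((add_tower_cond cols rest d c).mpr h)]

lemma add_tower_some (cols rest : List Int) (d c : Int)
    (h : ¬ coveredA cols d (cols.length : Int) c) :
    add_tower (cols ++ rest) d (cols.length : Int) c =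
      some (PySem.List.pySetD (cols ++ rest) (cols.length : Int) c) := by
  unfold add_tower
  rw [if_neg (fun hc => h ((add_tower_cond cols rest d c).mp hc))]

lemma row_step (cols rest : List Int) (d : Int) (n : Nat) :
    (PySem.List.pyRange 0 (n : Int) 1).findSome?
        (fun i => add_tower (cols ++ rest) d (cols.length : Int) i) =
      (if sweepFree (rowIntervals cols d (cols.length : Int)) < (n : Int) then
        some (PySem.List.pySetD (cols ++ rest) (cols.length : Int)
          (sweepFree (rowIntervals cols d (cols.length : Int))))
      else none) := by
  have hs : (rowIntervals cols d (cols.length : Int)).Pairwise (fun a b => a.1 ≤ b.1) := by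
    unfold rowIntervals
    exact PySem.List.sorted_pairwise _ _
  obtain ⟨hm0, hmid, hfree⟩ := sweep_spec (rowIntervals cols d (cols.length : Int)) 0 hs
  have hmeq : sweepFree (rowIntervals cols d (cols.length : Int)) =
      (rowIntervals cols d (cols.length : Int)).foldl
        (fun free iv => if iv.1 ≤ free then max free (iv.2 + 1) else free) 0 := rfl
  rw [hmeq] at *
  set m := (rowIntervals cols d (cols.length : Int)).foldl
      (fun free iv => if iv.1 ≤ free then max free (iv.2 + 1) else free) 0 with hm
  rw [findSome?_pyRange_first _ (n : Int) m ((n : Int) - 0).toNat 0 rfl hm0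
      (fun c h1 h2 => add_tower_none cols rest d c
        ((coveredBy_rowIntervals cols d c).mp (hmid c h1 h2)))
      (fun hlt => by
        rw [add_tower_some cols rest d m
          (fun hc => hfree ((coveredBy_rowIntervals cols d m).mpr hc))]
        rfl)]
  split_ifs with h
  · rw [add_tower_some cols rest d m
      (fun hc => hfree ((coveredBy_rowIntervals cols d m).mpr hc))]
  · rfl

lemma findSome?_ext {α β : Type} (f g : α → Option β) : ∀ (l : List α),
    (∀ x ∈ l, f x = g x) → l.findSome? f = l.findSome? g := by
  intro l
  induction l with
  | nil => intro _; rfl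
  | cons x t ih =>
    intro h
    rw [List.findSome?_cons, List.findSome?_cons, h x (by simp)]
    cases g x with
    | some v => rfl
    | none => exact ih (fun y hy => h y (by simp [hy]))

lemma foldl_step_none (d nI : Int) : ∀ (l : List Int),
    l.foldl (fun acc row => acc.bind (fun cols =>
        let free := sweepFree (rowIntervals cols d row)
        if free < nI then some (cols ++ [free]) else none)) none = none := by
  intro l
  induction l with
  | nil => rfl
  | cons x t ih => simpa using ih

lemma main_loop (d : Int) (n : Nat) : ∀ (fuel : Nat) (cols : List Int),
    cols.length ≤ n → fuel = n - cols.length →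
    (let r := n_tower_helperGo fuel (cols ++ List.replicate (n - cols.length) 0) d (cols.length : Int)
     if r.1 then some r.2 else none) =
      (PySem.List.pyRange (cols.length : Int) (n : Int) 1).foldl
        (fun acc row => acc.bind (fun cols =>
            let free := sweepFree (rowIntervals cols d row)
            if free < (n : Int) then some (cols ++ [free]) else none))
        (some cols) := by
  intro fuel
  induction fuel with
  | zero =>
    intro cols hle hf
    have hLn : cols.length = n := by omega
    rw [PySem.List.pyRange_one_eq_nil (by omega), List.foldl_nil]
    simp [n_tower_helperGo, hLn]
  | succ f ih =>
    intro cols hle hf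
    have hLn : cols.length < n := by omega
    have hblen : (cols ++ List.replicate (n - cols.length) 0).length = n := by
      simp; omega
    simp only [n_tower_helperGo, hblen]
    rw [if_neg (show ¬((cols.length : Int) = (n : Int)) by exact_mod_cast Nat.ne_of_lt hLn)]
    rw [row_step cols (List.replicate (n - cols.length) 0) d n]
    rw [PySem.List.pyRange_one_cons (by exact_mod_cast hLn), List.foldl_cons]
    simp only [Option.bind_some]
    by_cases hm : sweepFree (rowIntervals cols d (cols.length : Int)) < (n : Int)
    · rw [if_pos hm, if_pos hm]
      set m := sweepFree (rowIntervals cols d (cols.length : Int)) with hmdef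
      have hset : PySem.List.pySetD (cols ++ List.replicate (n - cols.length) 0) (cols.length : Int) m
          = (cols ++ [m]) ++ List.replicate (n - (cols ++ [m]).length) 0 := by
        rw [PySem.List.pySetD_natCast]
        have hrep : List.replicate (n - cols.length) (0 : Int) = 0 :: List.replicate (n - cols.length - 1) 0 := by
          rw [← List.replicate_succ]
          congr 1
          omega
        rw [hrep]
        simp
        omega
      rw [hset]
      have hrow : (cols.length : Int) + 1 = ((cols ++ [m]).length : Int) := by simp
      rw [hrow]
      exact ih (cols ++ [m]) (by simp; omega) (by simp; omega)
    · rw [if_neg hm, if_neg hm]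
      exact (foldl_step_none d (n : Int) _).symm

theorem ports_eq (n d : Int) : n_tower n d = n_tower_alt n d := by
  unfold n_tower n_tower_alt
  congr 1
  apply findSome?_ext
  intro i hi
  rw [PySem.List.mem_pyRange_one] at hi
  have hn1 : 1 ≤ n.toNat := by omega
  have hcast : ((n.toNat : Nat) : Int) = n := by omega
  dsimp only
  have hb : PySem.List.pySetD (List.replicate n.toNat (0:Int)) 0 i
      = [i] ++ List.replicate (n.toNat - 1) 0 := by
    rw [PySem.List.pySetD_of_nonneg _ _ (le_refl (0:Int))]
    obtain ⟨k, hk⟩ : ∃ k, n.toNat = k + 1 := ⟨n.toNat - 1, by omega⟩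
    rw [hk]
    simp [List.replicate_succ]
  rw [hb]
  unfold n_tower_helper
  have hfuel : (((([i] ++ List.replicate (n.toNat - 1) (0:Int)).length : Int)) - 1).toNat
      = n.toNat - 1 := by simp
  rw [hfuel]
  have ml := main_loop d n.toNat (n.toNat - 1) [i] (by simp; omega) (by simp)
  simp only [List.length_cons, List.length_nil] at ml
  rw [hcast] at ml
  exact ml

-- ===== VERDICT (by name: the statement is the Claim_ definition above) =====
theorem n_tower_spec : Claim_equal_n_tower := by
  intro n d _
  unfold Spec_n_tower
  exact ports_eq n d
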